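-- pv_equiv track=rewrite | github.com/roverdotcom/feats.py | feats/django/views/base.py | compress_formsets
-- ===== SOURCE A (Python) =====
-- from collections import defaultdict
--
-- def parse_field(key, prefix):
--     """
--     Given a string of the form "{prefix}-{index}-{field_name}", returns the index and field name
--     If the string does not meet this form, returns None, None
--     """
--     startswith, *rest = key.split(prefix, 1)
--     if startswith != '' or len(rest) != 1:
--         return None, None
--
--     _, index, *rest = rest[0].split('-', 2)
--     if len(rest) == 0:
--         return None, None
--
--     try:
--         return int(index), rest[0]
--     except ValueError:
--         # Management forms don't have an index, so will start with {prefix} but won't be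
--         # able to parse out an integer from the second component
--         return None, None
--
-- def compress_formsets(data, prefix):
--     """
--     The UI allows any individual row to be removed from the formset, which can leave gaps in
--     the POST data. Django formsets don't work unless each index is sequential, starting from 0,
--     so we need to convert the sparse array to a dense array.
--     This could also be acomplished with Formset.can_delete, but would require more logic on the frontend
--     """
--     forms = defaultdict(dict)
--     dense = {}
--     for key, value in data.items():
--         index, field = parse_field(key, prefix)
--         if index is not None:
--             forms[index][field] = value
--         else:
--             # Not a form field, pass the data straight through
--             dense[key] = value
--
--     form_index = 0
--     for sparse_index, fields in forms.items():
--         for field, value in fields.items():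
--             dense_key = f'{prefix}-{form_index}-{field}'
--             dense[dense_key] = value
--         form_index += 1
--
--     return dense
-- ===== SOURCE B (Python) =====
-- def parse_field(key, prefix):
--     startswith, *rest = key.split(prefix, 1)
--     if startswith != '' or len(rest) != 1:
--         return None, None
--     _, index, *rest = rest[0].split('-', 2)
--     if len(rest) == 0:
--         return None, None
--     try:
--         return int(index), rest[0]
--     except ValueError:
--         return None, None
--
--
-- def compress_formsets(data, prefix):
--     # Flat representation: remap sparse index -> dense index (first-appearance
--     # order) and a flat list of (dense_index, field, value) form entries;
--     # pass-through keys are written first, then forms grouped by dense index.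
--     remap = {}
--     dense = {}
--     forms = []
--     for key, value in data.items():
--         index, field = parse_field(key, prefix)
--         if index is None:
--             dense[key] = value
--         else:
--             forms.append((remap.setdefault(index, len(remap)), field, value))
--     for d in range(len(remap)):
--         for di, field, value in forms:
--             if di == d:
--                 dense[f'{prefix}-{d}-{field}'] = value
--     return dense
-- ===== Notes on version B (the rewrite author's own statement) =====
-- stated objective: alternative
-- what changed: Replaces A's nested {index: {field: value}} defaultdict grouping with a flat {sparse index -> dense index} remap assigned at first appearance plus a flat (dense_index, field, value) entries list, then emits the groups by scanning the entries once per dense index instead of iterating the nested dict.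
import Mathlib
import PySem

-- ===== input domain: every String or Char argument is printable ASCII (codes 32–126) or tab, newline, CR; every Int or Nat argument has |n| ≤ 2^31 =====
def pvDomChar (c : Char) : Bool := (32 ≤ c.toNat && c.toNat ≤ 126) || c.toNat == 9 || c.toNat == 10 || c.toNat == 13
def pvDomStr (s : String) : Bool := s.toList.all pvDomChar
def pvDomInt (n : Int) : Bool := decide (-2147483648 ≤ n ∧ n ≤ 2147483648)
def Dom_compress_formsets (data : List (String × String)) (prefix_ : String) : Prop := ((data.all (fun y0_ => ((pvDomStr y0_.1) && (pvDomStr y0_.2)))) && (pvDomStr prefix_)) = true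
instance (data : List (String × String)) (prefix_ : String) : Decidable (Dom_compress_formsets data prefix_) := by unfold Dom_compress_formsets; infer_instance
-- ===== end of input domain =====

-- B keeps a flat {sparse index -> dense index} remap and a flat entries list instead of A's
-- nested {index: {field: value}} grouping; objective: alternative (different data representation).

-- ===== PORT A =====
-- shared module-level helper used verbatim by both A and B
def parse_field (key : String) (prefix_ : String) : Option (Int × String) :=
  match PySem.Str.splitMax? key prefix_ 1 with
  | none => none  -- prefix = "": Python raises ValueError; excluded by Pre_
  | some [] => none  -- unreachable: split returns at least one part
  | some (startswith :: rest) =>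
    if startswith ≠ "" ∨ rest.length ≠ 1 then none
    else
      match PySem.Str.splitMax? (rest.headD "") "-" 2 with
      | none => none  -- unreachable: separator "-" is nonempty
      | some (_ :: index :: rest2) =>
        if rest2.length = 0 then none
        else
          match PySem.Int.ofStr? index with
          | some n => some (n, rest2.headD "")
          | none => none
      | some _ => none  -- fewer than 2 parts: Python raises ValueError (unpack); excluded by Pre_

def compress_formsets (data : List (String × String)) (prefix_ : String) : List (String × String) :=
  let st := data.foldl
    (fun (st : PySem.Dict Int (PySem.Dict String String) × PySem.Dict String String) kv =>
      match parse_field kv.1 prefix_ with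
      | some (i, f) => (st.1.modify i PySem.Dict.empty (fun d => d.insert f kv.2), st.2)
      | none => (st.1, st.2.insert kv.1 kv.2))
    (PySem.Dict.empty, PySem.Dict.empty)
  let res := st.1.items.foldl
    (fun (s : PySem.Dict String String × Int) p =>
      (p.2.items.foldl (fun d q => d.insert (prefix_ ++ "-" ++ PySem.Int.toStr s.2 ++ "-" ++ q.1) q.2) s.1,
       s.2 + 1))
    (st.2, 0)
  res.1.items

-- ===== PORT B =====
def compress_formsets_alt (data : List (String × String)) (prefix_ : String) : List (String × String) :=
  let st := data.foldl
    (fun (st : PySem.Dict Int Int × PySem.Dict String String × List (Int × String × String)) kv =>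
      match parse_field kv.1 prefix_ with
      | some (i, f) =>
          -- forms.append((remap.setdefault(index, len(remap)), field, value));
          -- setdefault's return value is (remap.get? index).getD len(remap)
          (st.1.setdefault i (st.1.size : Int), st.2.1,
           st.2.2 ++ [((st.1.get? i).getD (st.1.size : Int), f, kv.2)])
      | none => (st.1, st.2.1.insert kv.1 kv.2, st.2.2))
    (PySem.Dict.empty, PySem.Dict.empty, [])
  let dense := (PySem.List.pyRange 0 (st.1.size : Int) 1).foldl
    (fun dense d =>
      st.2.2.foldl
        (fun dense e =>
          if e.1 == d then dense.insert (prefix_ ++ "-" ++ PySem.Int.toStr d ++ "-" ++ e.2.1) e.2.2 else dense)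
        dense)
    st.2.1
  dense.items

-- ===== PRECONDITION & SPEC =====
-- Pre_ excludes exactly the inputs on which the Python raises: an empty prefix (ValueError from
-- str.split('')), and a key that starts with the prefix but has no '-' afterwards (ValueError
-- from unpacking); both A and B raise there.
def Pre_compress_formsets (data : List (String × String)) (prefix_ : String) : Prop :=
  (data = [] ∨ prefix_ ≠ "") ∧ ∀ kv ∈ data, PySem.Str.startswith kv.1 prefix_ = true →
    PySem.Str.isIn "-" (PySem.Str.slice kv.1 (some (PySem.Str.len prefix_)) none) = true
instance (data : List (String × String)) (prefix_ : String) : Decidable (Pre_compress_formsets data prefix_) := by unfold Pre_compress_formsets; infer_instance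

def pvWitness_compress_formsets : (List (String × String)) × String :=
  ([("p-0-a", "x"), ("p-3-b", "y"), ("other", "z")], "p")

def Spec_compress_formsets (data : List (String × String)) (prefix_ : String) (out : List (String × String)) : Prop := out = compress_formsets_alt data prefix_
instance (data : List (String × String)) (prefix_ : String) (out : List (String × String)) : Decidable (Spec_compress_formsets data prefix_ out) := by unfold Spec_compress_formsets; infer_instance

-- ===== CLAIM (what is proved, stated in full; the proofs are below) =====
def Claim_equal_compress_formsets : Prop := ∀ (data : List (String × String)) (prefix_ : String), Dom_compress_formsets data prefix_ → Pre_compress_formsets data prefix_ → Spec_compress_formsets data prefix_ (compress_formsets data prefix_)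

-- ===== LEMMAS AND PROOFS =====

-- insert a (key, value) pair (the common loop body of both phase-2 folds)
def pvIns (d : PySem.Dict String String) (p : String × String) : PySem.Dict String String :=
  d.insert p.1 p.2

-- the value the LAST pair with key x in l carries, if any (Python dict: last write wins)
def pvLast (l : List (String × String)) (x : String) : Option String :=
  (l.reverse.find? (fun p => p.1 == x)).map (·.2)

-- the form entries of data, in order: (index, field, value)
def pvOpt (prefix_ : String) (kv : String × String) : List (Int × String × String) :=
  match parse_field kv.1 prefix_ with
  | some (i, f) => [(i, f, kv.2)]
  | none => []

def pvEnt (data : List (String × String)) (prefix_ : String) : List (Int × String × String) :=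
  data.flatMap (pvOpt prefix_)

-- the distinct sparse indices in first-appearance order
def pvS (data : List (String × String)) (prefix_ : String) : List Int :=
  PySem.Set.ofList ((pvEnt data prefix_).map (·.1))

-- the pass-through dict
def pvD0 (data : List (String × String)) (prefix_ : String) : PySem.Dict String String :=
  data.foldl
    (fun d kv => match parse_field kv.1 prefix_ with
      | some _ => d
      | none => d.insert kv.1 kv.2)
    PySem.Dict.empty

-- B's remap dict as an association list: indices of S paired with their positions
def pvMkR : List Int → Nat → List (Int × Int)
  | [], _ => []
  | i :: s, n => (i, (n : Int)) :: pvMkR s (n + 1)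

-- the inner dict A builds for sparse index i
def pvGd (data : List (String × String)) (prefix_ : String) (i : Int) : PySem.Dict String String :=
  ((pvEnt data prefix_).filter (fun e => e.1 == i)).foldl
    (fun g e => g.insert e.2.1 e.2.2) PySem.Dict.empty

-- B's entries list with dense indices: each form entry tagged with the position of its
-- sparse index in pvS
def pvE' (data : List (String × String)) (prefix_ : String) : List (Int × String × String) :=
  (pvEnt data prefix_).map (fun e => (((List.idxOf e.1 (pvS data prefix_) : Nat) : Int), e.2))

-- ---------- generic facts about insert-folds over String dicts ----------

theorem pv_get?_foldl (l : List (String × String)) (D : PySem.Dict String String) (x : String) :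
    (l.foldl pvIns D).get? x = (pvLast l x).or (D.get? x) := by
  induction l generalizing D with
  | nil => simp [pvLast]
  | cons p l ih =>
    simp only [List.foldl_cons]
    rw [ih]
    have hx1 : (pvIns D p).get? x = if x = p.1 then some p.2 else D.get? x :=
      PySem.Dict.get?_insert D p.1 x p.2
    have hlast : pvLast (p :: l) x = (pvLast l x).or (if p.1 == x then some p.2 else none) := by
      unfold pvLast
      rw [List.reverse_cons, List.find?_append]
      rcases h : List.find? (fun q => q.1 == x) l.reverse with _ | q
      · cases hb : (p.1 == x) <;> simp [hb, h]
      · cases hb : (p.1 == x) <;> simp [hb, h, Option.or]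
    rw [hx1, hlast]
    rcases hpl : pvLast l x with _ | v
    · cases hb : (p.1 == x)
      · have hne : ¬ x = p.1 := fun hh => by simp [hh] at hb
        simp [hne, Option.or]
      · have heq : x = p.1 := (beq_iff_eq.mp hb).symm
        simp [heq, Option.or]
    · simp [Option.or]

theorem pv_keys_foldl (l : List (String × String)) (D : PySem.Dict String String) :
    (l.foldl pvIns D).keys = PySem.Set.update D.keys (l.map (fun p => p.1)) :=
  PySem.Dict.keys_foldl_insert_key l (fun p => p.1) (fun _ p => p.2) D

theorem pv_nodup_foldl (l : List (String × String)) (D : PySem.Dict String String)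
    (h : D.keys.Nodup) : (l.foldl pvIns D).keys.Nodup :=
  PySem.Dict.nodup_keys_foldl_insert_key l (fun p => p.1) (fun _ p => p.2) D h

theorem pv_find?_reverse (l : List (String × String)) (x : String)
    (h : (l.map (fun p => p.1)).Nodup) :
    l.reverse.find? (fun p => p.1 == x) = l.find? (fun p => p.1 == x) := by
  induction l with
  | nil => rfl
  | cons p l ih =>
    simp only [List.map_cons, List.nodup_cons] at h
    simp only [List.reverse_cons, List.find?_append, List.find?_cons]
    by_cases hx : p.1 = x
    · have hnone : List.find? (fun q => q.1 == x) l.reverse = none := by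
        rw [List.find?_eq_none]
        intro q hq
        simp only [beq_iff_eq]
        intro hqx
        exact h.1 (by
          subst hx; rw [← hqx]
          exact List.mem_map_of_mem (List.mem_reverse.mp hq))
      simp [hnone, hx]
    · have : (p.1 == x) = false := by simp [hx]
      simp [this, ih h.2]

theorem pv_last_items (d : PySem.Dict String String) (x : String) (h : d.keys.Nodup) :
    pvLast d.items x = d.get? x := by
  unfold pvLast
  rw [pv_find?_reverse _ _ h]
  rfl

theorem pv_dict_eq (D : PySem.Dict String String) (l1 l2 : List (String × String))
    (hk : D.keys.Nodup)
    (h1 : PySem.Set.update D.keys (l1.map (fun p => p.1))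
        = PySem.Set.update D.keys (l2.map (fun p => p.1)))
    (h2 : ∀ x, pvLast l1 x = pvLast l2 x) :
    l1.foldl pvIns D = l2.foldl pvIns D := by
  apply PySem.Dict.ext
  have n1 : (l1.foldl pvIns D).keys.Nodup := pv_nodup_foldl _ _ hk
  have n2 : (l2.foldl pvIns D).keys.Nodup := pv_nodup_foldl _ _ hk
  rw [PySem.Dict.items_eq_map_keys _ n1 "", PySem.Dict.items_eq_map_keys _ n2 ""]
  rw [pv_keys_foldl, pv_keys_foldl, h1]
  apply List.map_congr_left
  intro k _
  rw [PySem.Dict.getD_eq_get?_getD, PySem.Dict.getD_eq_get?_getD,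
    pv_get?_foldl, pv_get?_foldl, h2]

theorem pv_ofList_map {a b : Type} [BEq a] [LawfulBEq a] [BEq b] [LawfulBEq b]
    (f : a → b) (ks : List a) :
    PySem.Set.ofList ((PySem.Set.ofList ks).map f) = PySem.Set.ofList (ks.map f) := by
  induction ks using List.reverseRecOn with
  | nil => rfl
  | append_singleton ks k ih =>
    rw [PySem.Set.ofList_append_singleton, List.map_append, List.map_singleton,
      PySem.Set.ofList_append_singleton, ← ih]
    by_cases hk : k ∈ PySem.Set.ofList ks
    · rw [PySem.Set.add_of_mem hk]
      have : f k ∈ PySem.Set.ofList ((PySem.Set.ofList ks).map f) := by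
        rw [PySem.Set.mem_ofList]
        exact List.mem_map_of_mem hk
      rw [PySem.Set.add_of_mem this]
    · rw [PySem.Set.add_of_not_mem hk, List.map_append, List.map_singleton,
        PySem.Set.ofList_append_singleton]

theorem pv_update_congr {a : Type} [BEq a] [LawfulBEq a] (s : PySem.Set a)
    (l1 l2 : List a) (h : PySem.Set.ofList l1 = PySem.Set.ofList l2) :
    PySem.Set.update s l1 = PySem.Set.update s l2 := by
  rw [PySem.Set.update_eq_append_filter, PySem.Set.update_eq_append_filter, h]

theorem pv_last_map (C : String) (l : List (String × String)) (x : String) :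
    pvLast (l.map (fun q => (C ++ q.1, q.2))) x
    = ((l.reverse.find? (fun q => C ++ q.1 == x)).map (fun q => q.2)) := by
  unfold pvLast
  rw [← List.map_reverse, List.find?_map, Option.map_map]
  rfl

-- the per-group key-prefixing map: inserting a group dict's items equals inserting the
-- raw (field, value) pairs of the group, for any start dict with distinct keys
theorem pv_chunk (l : List (String × String)) (C : String) (D : PySem.Dict String String)
    (hk : D.keys.Nodup) :
    ((l.foldl pvIns PySem.Dict.empty).items.map (fun q => (C ++ q.1, q.2))).foldl pvIns D
    = (l.map (fun q => (C ++ q.1, q.2))).foldl pvIns D := by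
  have hnd : (l.foldl pvIns PySem.Dict.empty).keys.Nodup :=
    pv_nodup_foldl _ _ PySem.Dict.nodup_keys_empty
  apply pv_dict_eq _ _ _ hk
  · apply pv_update_congr
    have hkeys : (l.foldl pvIns PySem.Dict.empty).items.map (fun p => p.1)
        = PySem.Set.ofList (l.map (fun p => p.1)) := by
      have := pv_keys_foldl l PySem.Dict.empty
      rw [PySem.Dict.keys_empty, PySem.Set.update_nil_left] at this
      exact this
    rw [List.map_map, List.map_map]
    have h1 : ((fun p => p.1) ∘ fun (q : String × String) => (C ++ q.1, q.2))
        = (fun q => C ++ q.1) := rfl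
    rw [h1]
    have h2 : (fun (q : String × String) => C ++ q.1)
        = (fun s => C ++ s) ∘ (fun (q : String × String) => q.1) := rfl
    rw [h2, ← List.map_map, ← List.map_map, hkeys, pv_ofList_map]
  · intro x
    rw [pv_last_map, pv_last_map]
    by_cases hx : ∃ f : String, x = C ++ f
    · obtain ⟨f, rfl⟩ := hx
      have hp : ∀ (q : String × String), (C ++ q.1 == C ++ f) = (q.1 == f) := by
        intro q
        by_cases h : q.1 = f
        · simp [h]
        · have : ¬ C ++ q.1 = C ++ f := fun hc => h ((String.append_right_inj C).mp hc)
          simp [h, this]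
      have hfp : (fun (q : String × String) => C ++ q.1 == C ++ f) = (fun q => q.1 == f) :=
        funext hp
      rw [hfp]
      have hL : ((l.foldl pvIns PySem.Dict.empty).items.reverse.find?
          (fun q => q.1 == f)).map (fun q => q.2) = pvLast (l.foldl pvIns PySem.Dict.empty).items f := rfl
      rw [hL, pv_last_items _ _ hnd, pv_get?_foldl, PySem.Dict.get?_empty, Option.or_none]
      rfl
    · have hnone : ∀ (m : List (String × String)),
          m.find? (fun q => C ++ q.1 == x) = none := by
        intro m
        rw [List.find?_eq_none]
        intro q _
        simp only [beq_iff_eq]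
        exact fun hc => hx ⟨q.1, hc.symm⟩
      rw [hnone, hnone]

-- ---------- reduction of port A ----------

theorem pvA_phase1 (data : List (String × String)) (prefix_ : String)
    (init : PySem.Dict Int (PySem.Dict String String) × PySem.Dict String String) :
    data.foldl
      (fun st kv =>
        match parse_field kv.1 prefix_ with
        | some (i, f) => (st.1.modify i PySem.Dict.empty (fun d => d.insert f kv.2), st.2)
        | none => (st.1, st.2.insert kv.1 kv.2))
      init
    = ((pvEnt data prefix_).foldl
        (fun d e => d.modify e.1 PySem.Dict.empty (fun g => g.insert e.2.1 e.2.2)) init.1,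
       data.foldl
        (fun d kv =>
          match parse_field kv.1 prefix_ with
          | some _ => d
          | none => d.insert kv.1 kv.2) init.2) := by
  induction data generalizing init with
  | nil => simp [pvEnt]
  | cons kv l ih =>
    have hent : pvEnt (kv :: l) prefix_ = pvOpt prefix_ kv ++ pvEnt l prefix_ := by
      simp [pvEnt]
    simp only [List.foldl_cons]
    rcases h : parse_field kv.1 prefix_ with _ | ⟨i, f⟩
    · simp only [ih, hent, pvOpt, h]
      rfl
    · simp only [ih, hent, pvOpt, h]
      rfl

theorem pv_getD_modifyfold (E : List (Int × String × String))
    (Dm : PySem.Dict Int (PySem.Dict String String)) (i : Int) :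
    (E.foldl (fun d e => d.modify e.1 PySem.Dict.empty (fun g => g.insert e.2.1 e.2.2)) Dm).getD
        i PySem.Dict.empty
    = (E.filter (fun e => e.1 == i)).foldl (fun g e => g.insert e.2.1 e.2.2)
        (Dm.getD i PySem.Dict.empty) := by
  induction E generalizing Dm with
  | nil => rfl
  | cons e E ih =>
    simp only [List.foldl_cons, List.filter_cons]
    rw [ih]
    by_cases hi : e.1 = i
    · have hb : (e.1 == i) = true := by simp [hi]
      rw [hb]
      simp only [List.foldl_cons]
      rw [PySem.Dict.getD_modify]
      simp [hi]
    · have hb : (e.1 == i) = false := by simp [hi]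
      rw [hb]
      rw [PySem.Dict.getD_modify]
      simp [Ne.symm hi]

-- recursion describing A's phase-2 loop (counter-carrying fold over the group dicts)
def pvRunA (prefix_ : String) : List (Int × PySem.Dict String String) → Int →
    PySem.Dict String String → PySem.Dict String String
  | [], _, D => D
  | p :: L, c, D =>
    pvRunA prefix_ L (c + 1)
      ((p.2.items.map (fun q => (prefix_ ++ "-" ++ PySem.Int.toStr c ++ "-" ++ q.1, q.2))).foldl pvIns D)

theorem pvA_phase2 (prefix_ : String) (L : List (Int × PySem.Dict String String))
    (D : PySem.Dict String String) (c : Int) :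
    (L.foldl
      (fun s p =>
        (p.2.items.foldl
          (fun d q => d.insert (prefix_ ++ "-" ++ PySem.Int.toStr s.2 ++ "-" ++ q.1) q.2) s.1,
         s.2 + 1))
      (D, c)).1
    = pvRunA prefix_ L c D := by
  induction L generalizing D c with
  | nil => rfl
  | cons p L ih =>
    simp only [List.foldl_cons, pvRunA]
    rw [← ih]
    congr 1
    rw [List.foldl_map]
    rfl

-- ---------- reduction of port B ----------

theorem pv_mkR_len (S : List Int) (n : Nat) : (pvMkR S n).length = S.length := by
  induction S generalizing n with
  | nil => rfl
  | cons i s ih => simp [pvMkR, ih]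

theorem pv_mkR_append (S : List Int) (k : Int) (n : Nat) :
    pvMkR (S ++ [k]) n = pvMkR S n ++ [(k, ((n + S.length : Nat) : Int))] := by
  induction S generalizing n with
  | nil => simp [pvMkR]
  | cons i s ih =>
    simp only [List.cons_append, pvMkR, ih, List.length_cons, List.cons.injEq, true_and]
    congr 3
    omega

theorem pv_mkR_get? (S : List Int) (n : Nat) (i : Int) :
    (PySem.Dict.mk (pvMkR S n) : PySem.Dict Int Int).get? i
    = if i ∈ S then some (((n + List.idxOf i S : Nat) : Int)) else none := by
  induction S generalizing n with
  | nil => simp [pvMkR, PySem.Dict.get?]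
  | cons k s ih =>
    simp only [pvMkR]
    rw [PySem.Dict.get?_mk_cons]
    by_cases hk : k = i
    · subst hk
      simp
    · have hb : (k == i) = false := by simp [hk]
      have hmem : i ∈ k :: s ↔ i ∈ s := by simp [Ne.symm hk]
      have hidx : List.idxOf i (k :: s) = List.idxOf i s + 1 := by
        simp [List.idxOf_cons, hb]
      rw [hb]
      simp only [Bool.false_eq_true, if_false, ih]
      by_cases hm : i ∈ s
      · rw [if_pos hm, if_pos (hmem.mpr hm), hidx]
        congr 2
        omega
      · rw [if_neg hm, if_neg (fun hc => hm (hmem.mp hc))]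

theorem pv_mem_S (data : List (String × String)) (prefix_ : String)
    (e : Int × String × String) (he : e ∈ pvEnt data prefix_) : e.1 ∈ pvS data prefix_ := by
  rw [pvS, PySem.Set.mem_ofList]
  exact List.mem_map_of_mem he

theorem pvB_phase1 (data : List (String × String)) (prefix_ : String) :
    data.foldl
      (fun (st : PySem.Dict Int Int × PySem.Dict String String × List (Int × String × String)) kv =>
        match parse_field kv.1 prefix_ with
        | some (i, f) =>
            (st.1.setdefault i (st.1.size : Int), st.2.1,
             st.2.2 ++ [((st.1.get? i).getD (st.1.size : Int), f, kv.2)])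
        | none => (st.1, st.2.1.insert kv.1 kv.2, st.2.2))
      (PySem.Dict.empty, PySem.Dict.empty, [])
    = (PySem.Dict.mk (pvMkR (pvS data prefix_) 0), pvD0 data prefix_, pvE' data prefix_) := by
  induction data using List.reverseRecOn with
  | nil => rfl
  | append_singleton l kv ih =>
    rw [List.foldl_append, ih]
    have hent : pvEnt (l ++ [kv]) prefix_ = pvEnt l prefix_ ++ pvOpt prefix_ kv := by
      simp [pvEnt, List.flatMap_append, pvOpt]
    have hD0 : pvD0 (l ++ [kv]) prefix_
        = (match parse_field kv.1 prefix_ with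
           | some _ => pvD0 l prefix_
           | none => (pvD0 l prefix_).insert kv.1 kv.2) := by
      unfold pvD0
      rw [List.foldl_append]
      rfl
    simp only [List.foldl_cons, List.foldl_nil]
    rcases h : parse_field kv.1 prefix_ with _ | ⟨i, f⟩
    · have hS : pvS (l ++ [kv]) prefix_ = pvS l prefix_ := by
        simp [pvS, hent, pvOpt, h]
      have hE : pvE' (l ++ [kv]) prefix_ = pvE' l prefix_ := by
        simp [pvE', hent, pvOpt, h, hS]
      rw [hD0, h]
      simp [h, hS, hE]
    · have hent' : pvEnt (l ++ [kv]) prefix_ = pvEnt l prefix_ ++ [(i, f, kv.2)] := by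
        simp [hent, pvOpt, h]
      have hS : pvS (l ++ [kv]) prefix_ = PySem.Set.add (pvS l prefix_) i := by
        simp [pvS, hent', PySem.Set.ofList_append_singleton]
      have hsize : ((PySem.Dict.mk (pvMkR (pvS l prefix_) 0) : PySem.Dict Int Int).size : Int)
          = ((pvS l prefix_).length : Int) := by
        simp [PySem.Dict.size, pv_mkR_len]
      by_cases hm : i ∈ pvS l prefix_
      · -- index already seen: remap unchanged, entry gets its stored position
        have hadd : PySem.Set.add (pvS l prefix_) i = pvS l prefix_ := PySem.Set.add_of_mem hm
        have hget : (PySem.Dict.mk (pvMkR (pvS l prefix_) 0) : PySem.Dict Int Int).get? i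
            = some ((List.idxOf i (pvS l prefix_) : Nat) : Int) := by
          rw [pv_mkR_get?]
          simp [hm]
        have hcont : (PySem.Dict.mk (pvMkR (pvS l prefix_) 0) : PySem.Dict Int Int).contains i
            = true := by
          rw [PySem.Dict.contains_eq_isSome_get?, hget]
          rfl
        have hsd : (PySem.Dict.mk (pvMkR (pvS l prefix_) 0) : PySem.Dict Int Int).setdefault i
            ((PySem.Dict.mk (pvMkR (pvS l prefix_) 0) : PySem.Dict Int Int).size : Int)
            = PySem.Dict.mk (pvMkR (pvS l prefix_) 0) := by
          unfold PySem.Dict.setdefault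
          rw [hcont]
          simp
        have hE : pvE' (l ++ [kv]) prefix_
            = pvE' l prefix_ ++ [(((List.idxOf i (pvS l prefix_) : Nat) : Int), f, kv.2)] := by
          simp only [pvE', hent', List.map_append, List.map_singleton, hS, hadd]
        simp only [hsd, hget, hD0, h, hE, hS, hadd, Option.getD_some]
      · -- new index: remap gains it at position len(remap)
        have hadd : PySem.Set.add (pvS l prefix_) i = pvS l prefix_ ++ [i] := PySem.Set.add_of_not_mem hm
        have hget : (PySem.Dict.mk (pvMkR (pvS l prefix_) 0) : PySem.Dict Int Int).get? i
            = none := by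
          rw [pv_mkR_get?]
          simp [hm]
        have hcont : (PySem.Dict.mk (pvMkR (pvS l prefix_) 0) : PySem.Dict Int Int).contains i
            = false := by
          rw [PySem.Dict.contains_eq_isSome_get?, hget]
          rfl
        have hsd : (PySem.Dict.mk (pvMkR (pvS l prefix_) 0) : PySem.Dict Int Int).setdefault i
            ((PySem.Dict.mk (pvMkR (pvS l prefix_) 0) : PySem.Dict Int Int).size : Int)
            = PySem.Dict.mk (pvMkR (PySem.Set.add (pvS l prefix_) i) 0) := by
          unfold PySem.Dict.setdefault
          rw [hcont]
          simp only [Bool.false_eq_true, if_false]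
          congr 1
          rw [hadd, pv_mkR_append]
          congr 2
          simp [PySem.Dict.size, pv_mkR_len]
        have hidxnew : List.idxOf i (PySem.Set.add (pvS l prefix_) i) = (pvS l prefix_).length := by
          rw [hadd, List.idxOf_append]
          simp [hm, List.idxOf_cons]
        have hidxold : ∀ x ∈ pvS l prefix_,
            List.idxOf x (PySem.Set.add (pvS l prefix_) i) = List.idxOf x (pvS l prefix_) := by
          intro x hx
          rw [hadd, List.idxOf_append]
          simp [hx]
        have hE : pvE' (l ++ [kv]) prefix_
            = pvE' l prefix_ ++ [((((pvS l prefix_).length : Nat) : Int), f, kv.2)] := by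
          simp only [pvE', hent', List.map_append, List.map_singleton, hS]
          congr 1
          · apply List.map_congr_left
            intro e he
            have := hidxold e.1 (pv_mem_S l prefix_ e he)
            rw [this]
          · rw [hidxnew]
        rw [hsize] at hsd
        simp only [hsd, hget, hD0, h, hE, hS, hsize, Option.getD_none]

-- pvD0 has distinct keys (it is an insert-fold over the pass-through pairs)
theorem pv_nodup_D0 (data : List (String × String)) (prefix_ : String) :
    (pvD0 data prefix_).keys.Nodup := by
  have hfn : (fun (d : PySem.Dict String String) (kv : String × String) =>
      match parse_field kv.1 prefix_ with
      | some _ => d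
      | none => d.insert kv.1 kv.2)
      = fun d kv => if (parse_field kv.1 prefix_).isNone then pvIns d kv else d := by
    funext d kv
    rcases h : parse_field kv.1 prefix_ with _ | v <;> simp [h, pvIns]
  unfold pvD0
  rw [hfn, PySem.List.foldl_if_eq_foldl_filter]
  exact pv_nodup_foldl _ _ PySem.Dict.nodup_keys_empty

-- ---------- the master comparison ----------

theorem pv_master (prefix_ : String) (Ent : List (Int × String × String))
    (E' : List (Int × String × String)) (zs : List (Int × Nat))
    (hz : ∀ p ∈ zs,
      E'.filter (fun e => e.1 == ((p.2 : Nat) : Int))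
      = (Ent.filter (fun e => e.1 == p.1)).map (fun e => (((p.2 : Nat) : Int), e.2))) :
    ∀ (D : PySem.Dict String String), D.keys.Nodup →
    zs.foldl
      (fun D p =>
        ((((Ent.filter (fun e => e.1 == p.1)).foldl
            (fun g e => g.insert e.2.1 e.2.2) PySem.Dict.empty).items.map
          (fun q => (prefix_ ++ "-" ++ PySem.Int.toStr ((p.2 : Nat) : Int) ++ "-" ++ q.1, q.2))).foldl
          pvIns D))
      D
    = zs.foldl
      (fun D p =>
        ((E'.filter (fun e => e.1 == ((p.2 : Nat) : Int))).map
          (fun e => (prefix_ ++ "-" ++ PySem.Int.toStr ((p.2 : Nat) : Int) ++ "-" ++ e.2.1, e.2.2))).foldl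
          pvIns D)
      D := by
  induction zs with
  | nil => intro D _; rfl
  | cons p zs ih =>
    intro D hD
    simp only [List.foldl_cons]
    have hEfilter := hz p (List.mem_cons_self)
    have hGd : (Ent.filter (fun e => e.1 == p.1)).foldl
        (fun g e => g.insert e.2.1 e.2.2) PySem.Dict.empty
        = ((Ent.filter (fun e => e.1 == p.1)).map (fun e => (e.2.1, e.2.2))).foldl pvIns
          PySem.Dict.empty := by
      rw [List.foldl_map]
      rfl
    have hchunkB : (E'.filter (fun e => e.1 == ((p.2 : Nat) : Int))).map
        (fun e => (prefix_ ++ "-" ++ PySem.Int.toStr ((p.2 : Nat) : Int) ++ "-" ++ e.2.1, e.2.2))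
        = ((Ent.filter (fun e => e.1 == p.1)).map (fun e => (e.2.1, e.2.2))).map
          (fun q => (prefix_ ++ "-" ++ PySem.Int.toStr ((p.2 : Nat) : Int) ++ "-" ++ q.1, q.2)) := by
      rw [hEfilter, List.map_map, List.map_map]
      rfl
    have hstep : ((((Ent.filter (fun e => e.1 == p.1)).foldl
          (fun g e => g.insert e.2.1 e.2.2) PySem.Dict.empty).items.map
        (fun q => (prefix_ ++ "-" ++ PySem.Int.toStr ((p.2 : Nat) : Int) ++ "-" ++ q.1, q.2))).foldl
        pvIns D)
        = ((E'.filter (fun e => e.1 == ((p.2 : Nat) : Int))).map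
          (fun e => (prefix_ ++ "-" ++ PySem.Int.toStr ((p.2 : Nat) : Int) ++ "-" ++ e.2.1, e.2.2))).foldl
          pvIns D := by
      rw [hchunkB, hGd]
      exact pv_chunk _ _ _ hD
    rw [hstep]
    exact ih (fun q hq => hz q (List.mem_cons_of_mem _ hq)) _
      (pv_nodup_foldl _ _ hD)

-- counter-indexed recursion = fold over zipIdx
theorem pvRunA_zip (prefix_ : String) (data : List (String × String)) :
    ∀ (S' : List Int) (n : Nat) (D : PySem.Dict String String),
    pvRunA prefix_ (S'.map (fun i => (i, pvGd data prefix_ i))) ((n : Nat) : Int) D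
    = (S'.zipIdx n).foldl
        (fun D p =>
          (((pvGd data prefix_ p.1).items.map
            (fun q => (prefix_ ++ "-" ++ PySem.Int.toStr ((p.2 : Nat) : Int) ++ "-" ++ q.1, q.2))).foldl
            pvIns D))
        D := by
  intro S'
  induction S' with
  | nil => intro n D; rfl
  | cons i s ih =>
    intro n D
    rw [List.zipIdx_cons, List.map_cons]
    simp only [pvRunA, List.foldl_cons]
    have hc : ((n : Nat) : Int) + 1 = (((n + 1 : Nat)) : Int) := by push_cast; ring
    rw [hc, ih]

-- port A reduced to a fold over the indexed distinct-sparse-index list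
theorem pvA_eq (data : List (String × String)) (prefix_ : String) :
    compress_formsets data prefix_
    = (((pvS data prefix_).zipIdx 0).foldl
        (fun D p =>
          (((pvGd data prefix_ p.1).items.map
            (fun q => (prefix_ ++ "-" ++ PySem.Int.toStr ((p.2 : Nat) : Int) ++ "-" ++ q.1, q.2))).foldl
            pvIns D))
        (pvD0 data prefix_)).items := by
  unfold compress_formsets
  simp only [pvA_phase1 data prefix_ (PySem.Dict.empty, PySem.Dict.empty)]
  have hkeys : ((pvEnt data prefix_).foldl
      (fun d e => d.modify e.1 PySem.Dict.empty (fun g => g.insert e.2.1 e.2.2))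
      PySem.Dict.empty).keys = pvS data prefix_ := by
    have h := PySem.Dict.keys_foldl_modify_key (pvEnt data prefix_) (fun e => e.1)
      PySem.Dict.empty (fun _ e => fun g => g.insert e.2.1 e.2.2) PySem.Dict.empty
    rw [PySem.Dict.keys_empty, PySem.Set.update_nil_left] at h
    exact h
  have hnodup : ((pvEnt data prefix_).foldl
      (fun d e => d.modify e.1 PySem.Dict.empty (fun g => g.insert e.2.1 e.2.2))
      PySem.Dict.empty).keys.Nodup :=
    PySem.Dict.nodup_keys_foldl_modify_key (pvEnt data prefix_) (fun e => e.1)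
      PySem.Dict.empty (fun _ e => fun g => g.insert e.2.1 e.2.2) PySem.Dict.empty
      PySem.Dict.nodup_keys_empty
  have hitems : ((pvEnt data prefix_).foldl
      (fun d e => d.modify e.1 PySem.Dict.empty (fun g => g.insert e.2.1 e.2.2))
      PySem.Dict.empty).items
      = (pvS data prefix_).map (fun i => (i, pvGd data prefix_ i)) := by
    rw [PySem.Dict.items_eq_map_keys _ hnodup PySem.Dict.empty, hkeys]
    apply List.map_congr_left
    intro i _
    have h := pv_getD_modifyfold (pvEnt data prefix_) PySem.Dict.empty i
    rw [PySem.Dict.getD_empty] at h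
    rw [h]
    rfl
  rw [hitems, pvA_phase2]
  have h0 : (0 : Int) = ((0 : Nat) : Int) := rfl
  rw [h0, pvRunA_zip]
  rfl

-- port B reduced to the same shape of fold, over the dense-indexed entries
theorem pvB_eq (data : List (String × String)) (prefix_ : String) :
    compress_formsets_alt data prefix_
    = (((pvS data prefix_).zipIdx 0).foldl
        (fun D p =>
          (((pvE' data prefix_).filter (fun e => e.1 == ((p.2 : Nat) : Int))).map
            (fun e => (prefix_ ++ "-" ++ PySem.Int.toStr ((p.2 : Nat) : Int) ++ "-" ++ e.2.1, e.2.2))).foldl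
            pvIns D)
        (pvD0 data prefix_)).items := by
  unfold compress_formsets_alt
  simp only [pvB_phase1 data prefix_]
  have hsize : (((PySem.Dict.mk (pvMkR (pvS data prefix_) 0) : PySem.Dict Int Int)).size : Int)
      = (((pvS data prefix_).length : Nat) : Int) := by
    simp [PySem.Dict.size, pv_mkR_len]
  rw [hsize, PySem.List.pyRange_zero_nat, List.foldl_map]
  have hinner : ∀ (j : Nat) (D : PySem.Dict String String),
      (pvE' data prefix_).foldl
        (fun dense e =>
          if e.1 == ((j : Nat) : Int) then
            dense.insert (prefix_ ++ "-" ++ PySem.Int.toStr ((j : Nat) : Int) ++ "-" ++ e.2.1) e.2.2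
          else dense) D
      = (((pvE' data prefix_).filter (fun e => e.1 == ((j : Nat) : Int))).map
          (fun e => (prefix_ ++ "-" ++ PySem.Int.toStr ((j : Nat) : Int) ++ "-" ++ e.2.1, e.2.2))).foldl
          pvIns D := by
    intro j D
    rw [PySem.List.foldl_if_eq_foldl_filter
      (fun (e : Int × String × String) => e.1 == ((j : Nat) : Int))
      (fun (dense : PySem.Dict String String) (e : Int × String × String) =>
        dense.insert (prefix_ ++ "-" ++ PySem.Int.toStr ((j : Nat) : Int) ++ "-" ++ e.2.1) e.2.2),
      List.foldl_map]
    rfl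
  have houter : (List.range (pvS data prefix_).length).foldl
      (fun D j =>
        (((pvE' data prefix_).filter (fun e => e.1 == ((j : Nat) : Int))).map
          (fun e => (prefix_ ++ "-" ++ PySem.Int.toStr ((j : Nat) : Int) ++ "-" ++ e.2.1, e.2.2))).foldl
          pvIns D)
      (pvD0 data prefix_)
      = (((pvS data prefix_).zipIdx 0).foldl
        (fun D p =>
          (((pvE' data prefix_).filter (fun e => e.1 == ((p.2 : Nat) : Int))).map
            (fun e => (prefix_ ++ "-" ++ PySem.Int.toStr ((p.2 : Nat) : Int) ++ "-" ++ e.2.1, e.2.2))).foldl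
            pvIns D)
        (pvD0 data prefix_)) := by
    rw [List.range_eq_range', ← List.zipIdx_map_snd 0 (pvS data prefix_), List.foldl_map]
  rw [← houter]
  congr 1
  apply PySem.List.foldl_congr_mem
  intro D j _
  exact hinner j D

theorem pv_hz (data : List (String × String)) (prefix_ : String) :
    ∀ p ∈ (pvS data prefix_).zipIdx 0,
      (pvE' data prefix_).filter (fun e => e.1 == ((p.2 : Nat) : Int))
      = ((pvEnt data prefix_).filter (fun e => e.1 == p.1)).map
          (fun e => (((p.2 : Nat) : Int), e.2)) := by
  rintro ⟨i, j⟩ hp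
  obtain ⟨-, hlt, hij⟩ := List.mem_zipIdx hp
  simp only [Nat.sub_zero] at hij
  have hlen : j < (pvS data prefix_).length := by simpa using hlt
  have hnd : (pvS data prefix_).Nodup := PySem.Set.nodup_ofList _
  have hidxj : List.idxOf i (pvS data prefix_) = j := by
    rw [hij]
    exact hnd.idxOf_getElem j hlen
  unfold pvE'
  rw [List.filter_map]
  have hpred : ∀ e ∈ pvEnt data prefix_,
      (((fun e => e.1 == ((j : Nat) : Int)) ∘
        (fun e => (((List.idxOf e.1 (pvS data prefix_) : Nat) : Int), e.2))) e)
      = (e.1 == i) := by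
    intro e he
    have hmem : e.1 ∈ pvS data prefix_ := pv_mem_S data prefix_ e he
    simp only [Function.comp_apply]
    by_cases hcase : e.1 = i
    · simp [hcase, hidxj]
    · have hne : List.idxOf e.1 (pvS data prefix_) ≠ j := by
        intro hc
        apply hcase
        have hlt2 : List.idxOf e.1 (pvS data prefix_) < (pvS data prefix_).length :=
          List.idxOf_lt_length_of_mem hmem
        have h2 := List.getElem_idxOf hlt2
        simp only [hc] at h2
        exact h2.symm.trans hij.symm
      simp [hne, hcase]
  rw [List.filter_congr hpred]
  apply List.map_congr_left
  intro e he
  have he1 : e.1 = i := by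
    have := List.of_mem_filter he
    simpa using this
  rw [he1, hidxj]

theorem compress_formsets_spec : Claim_equal_compress_formsets := by
  intro data prefix_ _ _
  unfold Spec_compress_formsets
  rw [pvA_eq, pvB_eq]
  congr 1
  have hmaster := pv_master prefix_ (pvEnt data prefix_) (pvE' data prefix_)
    ((pvS data prefix_).zipIdx 0) (pv_hz data prefix_) (pvD0 data prefix_)
    (pv_nodup_D0 data prefix_)
  simp only [pvGd]
  exact hmaster
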